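-- pv_equiv track=rewrite | github.com/allenschmaltz/word_ordering_at_scale | code/data/generate_ngram_overlap_between_source_and_training.py | get_source_ngram_summary_stats
-- ===== SOURCE A (Python) =====
-- UNK_SYM = "$$UNK$$"
--
-- PAD_SYM = "$$PAD$$"
--
-- def collect_ngrams_for_sentence(ngram_dict, ngram_size, line_tokens):
--     for i in range(0, len(line_tokens)-(ngram_size-1)):
--         ngram = line_tokens[i:i+ngram_size]
--         assert len(ngram) == ngram_size
--         ngram = " ".join(ngram)
--         if ngram in ngram_dict:
--             ngram_dict[ngram] += 1
--         else:
--             ngram_dict[ngram] = 1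
--     return ngram_dict
--
-- def get_ngram_count_string(line_tokens, train_ngram_dict, ngram_size):
--     _source_ngrams = collect_ngrams_for_sentence({}, ngram_size,
--                                                  [PAD_SYM] * (ngram_size - 1) + line_tokens + [PAD_SYM] * (
--                                                  ngram_size - 1))
--     ngram_total_count = 0
--     ngram_covered_count = 0  # count of ngrams appearing in the training sentences
--     for ngram in _source_ngrams:
--         ngram_count = _source_ngrams[ngram]
--         ngram_total_count += ngram_count
--         if ngram in train_ngram_dict:
--             ngram_covered_count += ngram_count
--     return f"{ngram_total_count}\t{ngram_covered_count}"
--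
-- def get_source_ngram_summary_stats(source_lines, vocab, train_bigrams, train_trigrams, train_fourgrams, train_fivegrams):
--     line_stats = []
--
--     for line in source_lines:
--         line_tokens = []
--         unk_count = 0
--         for token in line:
--             if token in vocab:
--                 line_tokens.append(token)
--             else:
--                 unk_count += 1
--                 line_tokens.append(UNK_SYM)
--         # also add unigram unknowns (note that in the larger ngrams, unknowns are folded in, as would be seen in training)
--
--         line_ngram_count_strings = f"{len(line_tokens)}\t{len(line_tokens)-unk_count}\t"
--
--         line_ngram_count_strings += get_ngram_count_string(line_tokens, train_bigrams, 2) + f"\t"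
--         line_ngram_count_strings += get_ngram_count_string(line_tokens, train_trigrams, 3) + f"\t"
--         line_ngram_count_strings += get_ngram_count_string(line_tokens, train_fourgrams, 4) + f"\t"
--         line_ngram_count_strings += get_ngram_count_string(line_tokens, train_fivegrams, 5) + f"\n"
--
--         line_stats.append(line_ngram_count_strings)
--     return line_stats
-- ===== SOURCE B (Python) =====
-- UNK_SYM = "$$UNK$$"
--
-- PAD_SYM = "$$PAD$$"
--
-- def _stream_ngram_count_string(line_tokens, train_ngram_dict, ngram_size):
--     # single streaming pass over ngram start positions; no per-ngram count dict
--     padded = [PAD_SYM] * (ngram_size - 1) + line_tokens + [PAD_SYM] * (ngram_size - 1)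
--     total = 0
--     covered = 0
--     for i in range(0, len(padded) - (ngram_size - 1)):
--         total += 1
--         if " ".join(padded[i:i + ngram_size]) in train_ngram_dict:
--             covered += 1
--     return f"{total}\t{covered}"
--
-- def get_source_ngram_summary_stats(source_lines, vocab, train_bigrams, train_trigrams, train_fourgrams, train_fivegrams):
--     line_stats = []
--     for line in source_lines:
--         line_tokens = [tok if tok in vocab else UNK_SYM for tok in line]
--         unk_count = sum(1 for tok in line if tok not in vocab)
--         cols = [str(len(line_tokens)), str(len(line_tokens) - unk_count),
--                 _stream_ngram_count_string(line_tokens, train_bigrams, 2),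
--                 _stream_ngram_count_string(line_tokens, train_trigrams, 3),
--                 _stream_ngram_count_string(line_tokens, train_fourgrams, 4),
--                 _stream_ngram_count_string(line_tokens, train_fivegrams, 5)]
--         line_stats.append("\t".join(cols) + "\n")
--     return line_stats
-- ===== Notes on version B (the rewrite author's own statement) =====
-- stated objective: simpler
-- what changed: Per line and ngram size, A builds a per-ngram count dict in one pass and then sums over the dict's entries; B makes a single streaming pass over the ngram start positions, counting total and covered directly (no dict), computes the token list and UNK count by comprehensions instead of one accumulator loop, and assembles the row with a tab-join.
import Mathlib
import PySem

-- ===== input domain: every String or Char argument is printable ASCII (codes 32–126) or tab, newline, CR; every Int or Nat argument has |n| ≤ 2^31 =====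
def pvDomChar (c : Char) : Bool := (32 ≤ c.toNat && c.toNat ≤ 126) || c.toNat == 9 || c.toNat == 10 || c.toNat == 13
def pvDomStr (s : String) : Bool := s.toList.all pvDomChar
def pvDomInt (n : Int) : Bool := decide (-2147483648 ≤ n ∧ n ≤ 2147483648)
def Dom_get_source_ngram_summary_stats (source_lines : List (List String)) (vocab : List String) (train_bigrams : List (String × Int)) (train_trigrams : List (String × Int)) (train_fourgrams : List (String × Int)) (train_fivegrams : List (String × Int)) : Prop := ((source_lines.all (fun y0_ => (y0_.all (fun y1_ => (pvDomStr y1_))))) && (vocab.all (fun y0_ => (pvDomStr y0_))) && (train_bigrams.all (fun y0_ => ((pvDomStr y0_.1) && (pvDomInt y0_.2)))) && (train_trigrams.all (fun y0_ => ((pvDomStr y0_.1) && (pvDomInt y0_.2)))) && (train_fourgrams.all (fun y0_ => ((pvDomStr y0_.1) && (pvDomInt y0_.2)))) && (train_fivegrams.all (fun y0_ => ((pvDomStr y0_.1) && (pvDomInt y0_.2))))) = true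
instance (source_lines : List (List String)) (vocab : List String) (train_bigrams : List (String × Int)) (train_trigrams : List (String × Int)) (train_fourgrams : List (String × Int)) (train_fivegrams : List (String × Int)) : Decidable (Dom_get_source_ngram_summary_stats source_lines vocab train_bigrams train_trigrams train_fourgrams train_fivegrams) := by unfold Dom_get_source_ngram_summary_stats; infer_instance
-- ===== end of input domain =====

-- B replaces A's per-line two-phase ngram counting (build a count dict, then sum over it) by a
-- single streaming pass over ngram start positions, and assembles each row with a join; same output.


-- ===== PORT A =====
-- `tok in vocab` / `ngram in train_dict` (dict key membership on the assoc list)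
def pvKeyIn (train : List (String × Int)) (k : String) : Bool := train.any (fun p => p.1 == k)

def pvUNK : String := "$$UNK$$"
def pvPAD : String := "$$PAD$$"

-- collect_ngrams_for_sentence: the assert always holds on the padded input, so it is omitted
def pvCollect (d0 : PySem.Dict String Int) (n : Nat) (lt : List String) : PySem.Dict String Int :=
  (PySem.List.pyRange 0 ((lt.length : Int) - ((n : Int) - 1)) 1).foldl
    (fun d i =>
      let ngram := PySem.Str.join " " (PySem.List.slice lt (some i) (some (i + (n : Int))))
      if d.contains ngram then d.insert ngram (d.getD ngram 0 + 1) else d.insert ngram 1) d0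

-- get_ngram_count_string (ngram_size is always a literal 2..5, kept as Nat)
def pvCountString (lt : List String) (train : List (String × Int)) (n : Nat) : String :=
  let srcNgrams := pvCollect PySem.Dict.empty n
      (List.replicate (n - 1) pvPAD ++ lt ++ List.replicate (n - 1) pvPAD)
  -- for ngram in _source_ngrams: ngram_count = _source_ngrams[ngram] (key always present: getD)
  let tc := srcNgrams.keys.foldl
      (fun (acc : Int × Int) ngram =>
        let cnt := srcNgrams.getD ngram 0
        (acc.1 + cnt, if pvKeyIn train ngram then acc.2 + cnt else acc.2)) (0, 0)
  PySem.Int.toStr tc.1 ++ "\t" ++ PySem.Int.toStr tc.2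

def get_source_ngram_summary_stats (source_lines : List (List String)) (vocab : List String) (train_bigrams : List (String × Int)) (train_trigrams : List (String × Int)) (train_fourgrams : List (String × Int)) (train_fivegrams : List (String × Int)) : List String :=
  source_lines.foldl
    (fun line_stats line =>
      let tu := line.foldl
        (fun (acc : List String × Int) token =>
          if vocab.contains token then (acc.1 ++ [token], acc.2) else (acc.1 ++ [pvUNK], acc.2 + 1))
        ([], 0)
      let line_tokens := tu.1
      let unk_count := tu.2
      let s := PySem.Int.toStr (line_tokens.length : Int) ++ "\t" ++
               PySem.Int.toStr ((line_tokens.length : Int) - unk_count) ++ "\t" ++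
               pvCountString line_tokens train_bigrams 2 ++ "\t" ++
               pvCountString line_tokens train_trigrams 3 ++ "\t" ++
               pvCountString line_tokens train_fourgrams 4 ++ "\t" ++
               pvCountString line_tokens train_fivegrams 5 ++ "\n"
      line_stats ++ [s]) []

-- ===== PORT B =====
-- _stream_ngram_count_string: one streaming pass over start positions, no per-ngram dict
def pvStream (lt : List String) (train : List (String × Int)) (n : Nat) : String :=
  let padded := List.replicate (n - 1) pvPAD ++ lt ++ List.replicate (n - 1) pvPAD
  let tc := (PySem.List.pyRange 0 ((padded.length : Int) - ((n : Int) - 1)) 1).foldl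
      (fun (acc : Int × Int) i =>
        (acc.1 + 1,
         if pvKeyIn train (PySem.Str.join " " (PySem.List.slice padded (some i) (some (i + (n : Int))))) then acc.2 + 1 else acc.2))
      (0, 0)
  PySem.Int.toStr tc.1 ++ "\t" ++ PySem.Int.toStr tc.2

def get_source_ngram_summary_stats_alt (source_lines : List (List String)) (vocab : List String) (train_bigrams : List (String × Int)) (train_trigrams : List (String × Int)) (train_fourgrams : List (String × Int)) (train_fivegrams : List (String × Int)) : List String :=
  source_lines.map (fun line =>
    let line_tokens := line.map (fun tok => if vocab.contains tok then tok else pvUNK)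
    let unk_count : Int := (line.countP (fun tok => !vocab.contains tok) : Int)
    PySem.Str.join "\t"
      [PySem.Int.toStr (line_tokens.length : Int),
       PySem.Int.toStr ((line_tokens.length : Int) - unk_count),
       pvStream line_tokens train_bigrams 2,
       pvStream line_tokens train_trigrams 3,
       pvStream line_tokens train_fourgrams 4,
       pvStream line_tokens train_fivegrams 5] ++ "\n")

-- ===== PRECONDITION & SPEC =====
def Spec_get_source_ngram_summary_stats (source_lines : List (List String)) (vocab : List String) (train_bigrams : List (String × Int)) (train_trigrams : List (String × Int)) (train_fourgrams : List (String × Int)) (train_fivegrams : List (String × Int)) (out : List String) : Prop := out = get_source_ngram_summary_stats_alt source_lines vocab train_bigrams train_trigrams train_fourgrams train_fivegrams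
instance (source_lines : List (List String)) (vocab : List String) (train_bigrams : List (String × Int)) (train_trigrams : List (String × Int)) (train_fourgrams : List (String × Int)) (train_fivegrams : List (String × Int)) (out : List String) : Decidable (Spec_get_source_ngram_summary_stats source_lines vocab train_bigrams train_trigrams train_fourgrams train_fivegrams out) := by unfold Spec_get_source_ngram_summary_stats; infer_instance

-- ===== CLAIM (what is proved, stated in full; the proofs are below) =====
def Claim_equal_get_source_ngram_summary_stats : Prop := ∀ (source_lines : List (List String)) (vocab : List String) (train_bigrams : List (String × Int)) (train_trigrams : List (String × Int)) (train_fourgrams : List (String × Int)) (train_fivegrams : List (String × Int)), Dom_get_source_ngram_summary_stats source_lines vocab train_bigrams train_trigrams train_fourgrams train_fivegrams → Spec_get_source_ngram_summary_stats source_lines vocab train_bigrams train_trigrams train_fourgrams train_fivegrams (get_source_ngram_summary_stats source_lines vocab train_bigrams train_trigrams train_fourgrams train_fivegrams)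

-- ===== LEMMAS AND PROOFS =====

-- A's count-dict update step is insert (getD + 1) in both branches
theorem pvStep_eq (d : PySem.Dict String Int) (x : String) :
    (if d.contains x then d.insert x (d.getD x 0 + 1) else d.insert x 1) =
      d.insert x (d.getD x 0 + 1) := by
  by_cases h : d.contains x
  · simp [h]
  · simp only [Bool.not_eq_true] at h
    simp [h, PySem.Dict.getD_of_not_contains d 0 h]

-- split the (total, covered) pair fold into two sums
theorem pvPairFold (l : List String) (g : String → Int) (p : String → Bool) (init : Int × Int) :
    l.foldl (fun acc k => (acc.1 + g k, if p k then acc.2 + g k else acc.2)) init =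
      (init.1 + (l.map g).sum, init.2 + (l.map (fun k => if p k then g k else 0)).sum) := by
  induction l generalizing init with
  | nil => simp
  | cons a l ih =>
    simp only [List.foldl_cons, List.map_cons, List.sum_cons, ih]
    by_cases h : p a <;> simp [h, add_assoc]

-- summing an if-then-else over a list is summing over the filtered list
theorem pvIteFilterSum (l : List String) (p : String → Bool) (g : String → Int) :
    (l.map (fun k => if p k then g k else 0)).sum = ((l.filter p).map g).sum := by
  induction l with
  | nil => simp
  | cons a l ih => by_cases h : p a <;> simp [h, ih]

-- the per-ngram two-phase dict computation equals the streaming pass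
theorem pvCountString_eq_pvStream (lt : List String) (train : List (String × Int)) (n : Nat) :
    pvCountString lt train n = pvStream lt train n := by
  unfold pvCountString pvStream
  dsimp only
  set padded := List.replicate (n - 1) pvPAD ++ lt ++ List.replicate (n - 1) pvPAD with hp
  set f : Int → String :=
    fun i => PySem.Str.join " " (PySem.List.slice padded (some i) (some (i + (n : Int)))) with hf
  set xs := (PySem.List.pyRange 0 ((padded.length : Int) - ((n : Int) - 1)) 1).map f with hxs
  have hdict : pvCollect PySem.Dict.empty n padded = PySem.Dict.counter xs := by
    unfold pvCollect
    rw [← PySem.Dict.foldl_insert_getD_add_one_eq_counter xs, hxs, List.foldl_map]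
    simp only [pvStep_eq]
    rfl
  rw [hdict]
  have hperm : List.Perm (PySem.Set.ofList xs) xs.dedup :=
    (List.perm_ext_iff_of_nodup (PySem.Set.nodup_ofList xs) xs.nodup_dedup).2
      (by intro a; simp [PySem.Set.mem_ofList, List.mem_dedup])
  rw [PySem.Dict.keys_counter]
  have hbody : (fun (acc : Int × Int) ngram =>
      ((acc.1 + (PySem.Dict.counter xs).getD ngram 0,
        if pvKeyIn train ngram then acc.2 + (PySem.Dict.counter xs).getD ngram 0 else acc.2) : Int × Int)) =
      fun acc ngram => (acc.1 + ((xs.count ngram : Int)),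
        if pvKeyIn train ngram then acc.2 + (xs.count ngram : Int) else acc.2) := by
    funext acc ngram; simp [PySem.Dict.getD_counter]
  simp only [hbody]
  rw [pvPairFold]
  have hB : (PySem.List.pyRange 0 ((padded.length : Int) - ((n : Int) - 1)) 1).foldl
      (fun (acc : Int × Int) i =>
        (acc.1 + 1,
         if pvKeyIn train (PySem.Str.join " " (PySem.List.slice padded (some i) (some (i + (n : Int))))) then acc.2 + 1 else acc.2))
      (0, 0) =
      xs.foldl (fun (acc : Int × Int) s => (acc.1 + 1, if pvKeyIn train s then acc.2 + 1 else acc.2)) (0, 0) := by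
    rw [hxs, List.foldl_map]
  rw [hB, pvPairFold xs (fun _ => 1) (pvKeyIn train) (0, 0)]
  have htot : ((PySem.Set.ofList xs).map (fun k => (xs.count k : Int))).sum = (xs.length : Int) := by
    rw [(hperm.map _).sum_eq]
    have h2 := List.sum_map_count_dedup_eq_length xs
    calc (xs.dedup.map fun k => (xs.count k : Int)).sum
        = ((xs.dedup.map fun k => xs.count k).sum : Int) := by
          simp only [Nat.cast_list_sum, List.map_map]; rfl
      _ = (xs.length : Int) := by rw [h2]
  have hcov : ((PySem.Set.ofList xs).map
      (fun k => if pvKeyIn train k then (xs.count k : Int) else 0)).sum =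
      (xs.countP (pvKeyIn train) : Int) := by
    rw [(hperm.map _).sum_eq, pvIteFilterSum]
    have h2 := List.sum_map_count_dedup_filter_eq_countP (pvKeyIn train) xs
    calc ((xs.dedup.filter (pvKeyIn train)).map fun k => (xs.count k : Int)).sum
        = (((xs.dedup.filter (pvKeyIn train)).map fun k => xs.count k).sum : Int) := by
          simp only [Nat.cast_list_sum, List.map_map]; rfl
      _ = (xs.countP (pvKeyIn train) : Int) := by rw [h2]
  rw [htot, hcov, PySem.List.sum_map_const_int, PySem.List.sum_map_ite_one_zero]
  simp

-- A's token loop builds the mapped token list and the UNK count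
theorem pvTokenFold (line vocab : List String) (init1 : List String) (init2 : Int) :
    line.foldl (fun (acc : List String × Int) token =>
        if vocab.contains token then (acc.1 ++ [token], acc.2) else (acc.1 ++ [pvUNK], acc.2 + 1))
      (init1, init2) =
      (init1 ++ line.map (fun tok => if vocab.contains tok then tok else pvUNK),
       init2 + (line.countP (fun tok => !vocab.contains tok) : Int)) := by
  induction line generalizing init1 init2 with
  | nil => simp
  | cons a l ih =>
    simp only [List.foldl_cons]
    by_cases h : vocab.contains a
    · rw [if_pos h, ih, List.map_cons, if_pos h]
      have hm : a ∈ vocab := by simpa using h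
      simp [hm]
    · rw [if_neg h, ih, List.map_cons, if_neg h]
      simp only [Bool.not_eq_true] at h
      have hm : a ∉ vocab := by simpa using h
      simp only [List.countP_cons, Prod.mk.injEq]
      refine ⟨by simp, ?_⟩
      simp [hm]
      ring

-- the tab-join of the six columns, plus the newline, is A's chained concatenation
theorem pvJoinRow (a b c d e f : String) :
    PySem.Str.join "\t" [a, b, c, d, e, f] ++ "\n" =
      a ++ "\t" ++ b ++ "\t" ++ c ++ "\t" ++ d ++ "\t" ++ e ++ "\t" ++ f ++ "\n" := by
  apply String.ext
  simp [PySem.Str.join, PySem.Chars.join, List.intercalate, List.intersperse]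


-- ===== VERDICT (by name: the statement is the Claim_ definition above) =====
theorem get_source_ngram_summary_stats_spec : Claim_equal_get_source_ngram_summary_stats := by
  intro source_lines vocab tb tt tf t5 _dom
  unfold Spec_get_source_ngram_summary_stats
  unfold get_source_ngram_summary_stats get_source_ngram_summary_stats_alt
  rw [PySem.List.foldl_append_singleton_eq_map (f := fun line => _) source_lines []]
  simp only [List.nil_append]
  apply List.map_congr_left
  intro line _
  simp only [pvTokenFold line vocab [] 0, List.nil_append, Int.zero_add, List.length_map]
  rw [pvJoinRow]
  simp only [pvCountString_eq_pvStream]
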